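-- pv_equiv track=rewrite | github.com/Hemanth-Zero/422115 | replace.py | replacement_selection
-- ===== SOURCE A (Python) =====
-- import heapq
--
-- def replacement_selection(arr, m):
--     runs = []
--     heap = arr[:m]
--     heapq.heapify(heap)
--     i = m
--     current_run = []
--     next_heap = []
--
--     while heap:
--         smallest = heapq.heappop(heap)
--         current_run.append(smallest)
--
--         if i < len(arr):
--             if arr[i] >= smallest:
--                 heapq.heappush(heap, arr[i])
--             else:
--                 heapq.heappush(next_heap, arr[i])
--             i += 1
--
--         if not heap:
--             runs.append(current_run)
--             current_run = []
--             heap = next_heap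
--             heapq.heapify(heap)
--             next_heap = []
--
--     return runs
-- ===== SOURCE B (Python) =====
-- def replacement_selection(arr, m):
--     runs = []
--     current_pool = arr[:m]
--     i = m
--     current_run = []
--     next_pool = []
--
--     while current_pool:
--         smallest = min(current_pool)
--         current_pool.remove(smallest)
--         current_run.append(smallest)
--
--         if i < len(arr):
--             if arr[i] >= smallest:
--                 current_pool.append(arr[i])
--             else:
--                 next_pool.append(arr[i])
--             i += 1
--
--         if not current_pool:
--             runs.append(current_run)
--             current_run = []
--             current_pool = next_pool
--             next_pool = []
--
--     return runs
-- ===== Notes on version B (the rewrite author's own statement) =====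
-- stated objective: simpler
-- what changed: The heapq min-heaps (heapify/heappush/heappop) for the current and next pools are replaced by plain lists scanned with min() and pruned with list.remove(), keeping the same outer run-building loop.
import Mathlib
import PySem

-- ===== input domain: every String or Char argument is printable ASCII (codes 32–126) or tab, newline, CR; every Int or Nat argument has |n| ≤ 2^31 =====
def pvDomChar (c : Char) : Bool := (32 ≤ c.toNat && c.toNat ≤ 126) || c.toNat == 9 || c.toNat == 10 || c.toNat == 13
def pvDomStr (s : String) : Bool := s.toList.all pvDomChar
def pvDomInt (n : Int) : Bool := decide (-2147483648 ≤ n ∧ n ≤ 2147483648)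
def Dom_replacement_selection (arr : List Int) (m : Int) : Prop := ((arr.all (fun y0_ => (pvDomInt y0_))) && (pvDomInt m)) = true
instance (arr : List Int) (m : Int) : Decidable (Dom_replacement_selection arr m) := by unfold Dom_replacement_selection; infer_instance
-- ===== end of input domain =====

-- B replaces A's heapq min-heaps by plain list pools scanned with min() and pruned with
-- list.remove(), keeping the same outer run-building loop; the return values are proved equal.

-- ===== PORT A =====
-- heapq.heapify/heappush/heappop are ported as a binary min-heap tree (merge-based); on Int
-- values each heappop returns the minimum of the heap's contents, exactly as CPython's heapq
-- does (the heap's internal layout is unobservable in the returned runs).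
inductive PyHeap : Type
  | nil : PyHeap
  | node : Int → PyHeap → PyHeap → PyHeap
deriving DecidableEq, Repr

def hsize : PyHeap → Nat
  | .nil => 0
  | .node _ l r => hsize l + hsize r + 1

def hmerge : PyHeap → PyHeap → PyHeap
  | .nil, h => h
  | h, .nil => h
  | .node x l r, .node y l' r' =>
    if x ≤ y then .node x (hmerge r (.node y l' r')) l
    else .node y (hmerge r' (.node x l r)) l'
termination_by a b => hsize a + hsize b
decreasing_by all_goals (simp [hsize]; try omega)

-- heapq.heappush
def hpush (h : PyHeap) (x : Int) : PyHeap := hmerge h (.node x .nil .nil)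

-- heapq.heappop: none = IndexError on an empty heap (unreachable in A: the loop is guarded by `while heap`)
def hpop : PyHeap → Option (Int × PyHeap)
  | .nil => none
  | .node x l r => some (x, hmerge l r)

-- heapq.heapify
def hfy (l : List Int) : PyHeap := l.foldl hpush .nil

-- A's while-loop; state (heap, i, current_run, next_heap, runs).  `fuel` is only a structural
-- totalization guard: the loop pops each element at most once, so the ample fuel 2*len(arr)+1
-- passed below is never exhausted.  `heap = next_heap; heapify(heap)` is ported as taking over
-- next_heap directly: next_heap is maintained by heappush, so it already is a heap and the
-- re-heapify leaves its contents (the only thing observable in the runs) unchanged.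
def loopA (arr : List Int) (fuel : Nat) (heap : PyHeap) (i : Int) (run : List Int)
    (next : PyHeap) (runs : List (List Int)) : List (List Int) :=
  match fuel with
  | 0 => runs
  | fuel + 1 =>
    match hpop heap with
    | none => runs
    | some (smallest, heap1) =>
      let run1 := run ++ [smallest]
      if i < (arr.length : Int) then
        if (PySem.List.pyGetD arr i 0) ≥ smallest then
          if hpush heap1 (PySem.List.pyGetD arr i 0) = .nil then
            loopA arr fuel next (i + 1) [] .nil (runs ++ [run1])
          else
            loopA arr fuel (hpush heap1 (PySem.List.pyGetD arr i 0)) (i + 1) run1 next runs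
        else
          if heap1 = .nil then
            loopA arr fuel (hpush next (PySem.List.pyGetD arr i 0)) (i + 1) [] .nil (runs ++ [run1])
          else
            loopA arr fuel heap1 (i + 1) run1 (hpush next (PySem.List.pyGetD arr i 0)) runs
      else
        if heap1 = .nil then
          loopA arr fuel next i [] .nil (runs ++ [run1])
        else
          loopA arr fuel heap1 i run1 next runs

def replacement_selection (arr : List Int) (m : Int) : List (List Int) :=
  loopA arr (2 * arr.length + 1) (hfy (PySem.List.slice arr none (some m))) m [] .nil []

-- ===== PORT B =====
-- B's while-loop; state (current_pool, i, current_run, next_pool, runs); same ample fuel guard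
def loopB (arr : List Int) (fuel : Nat) (cur : List Int) (i : Int) (run : List Int)
    (nxt : List Int) (runs : List (List Int)) : List (List Int) :=
  match fuel with
  | 0 => runs
  | fuel + 1 =>
    match PySem.List.min? cur (fun y => y) with
    | none => runs
    | some smallest =>
      let cur1 := (PySem.List.remove? cur smallest).getD cur
      let run1 := run ++ [smallest]
      if i < (arr.length : Int) then
        if (PySem.List.pyGetD arr i 0) ≥ smallest then
          if cur1 ++ [PySem.List.pyGetD arr i 0] = [] then
            loopB arr fuel nxt (i + 1) [] [] (runs ++ [run1])
          else
            loopB arr fuel (cur1 ++ [PySem.List.pyGetD arr i 0]) (i + 1) run1 nxt runs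
        else
          if cur1 = [] then
            loopB arr fuel (nxt ++ [PySem.List.pyGetD arr i 0]) (i + 1) [] [] (runs ++ [run1])
          else
            loopB arr fuel cur1 (i + 1) run1 (nxt ++ [PySem.List.pyGetD arr i 0]) runs
      else
        if cur1 = [] then
          loopB arr fuel nxt i [] [] (runs ++ [run1])
        else
          loopB arr fuel cur1 i run1 nxt runs

def replacement_selection_alt (arr : List Int) (m : Int) : List (List Int) :=
  loopB arr (2 * arr.length + 1) (PySem.List.slice arr none (some m)) m [] [] []

-- ===== PRECONDITION & SPEC =====
def Spec_replacement_selection (arr : List Int) (m : Int) (out : List (List Int)) : Prop := out = replacement_selection_alt arr m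
instance (arr : List Int) (m : Int) (out : List (List Int)) : Decidable (Spec_replacement_selection arr m out) := by unfold Spec_replacement_selection; infer_instance

-- ===== CLAIM (what is proved, stated in full; the proofs are below) =====
def Claim_equal_replacement_selection : Prop := ∀ (arr : List Int) (m : Int), Dom_replacement_selection arr m → Spec_replacement_selection arr m (replacement_selection arr m)

-- ===== LEMMAS AND PROOFS =====
def hms : PyHeap → Multiset Int
  | .nil => 0
  | .node x l r => x ::ₘ (hms l + hms r)

def IsHeap : PyHeap → Prop
  | .nil => True
  | .node x l r => (∀ y ∈ hms l, x ≤ y) ∧ (∀ y ∈ hms r, x ≤ y) ∧ IsHeap l ∧ IsHeap r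

@[simp] theorem hms_hmerge (a b : PyHeap) : hms (hmerge a b) = hms a + hms b := by
  fun_induction hmerge a b <;> simp_all [hms, ← Multiset.singleton_add] <;> abel

theorem isHeap_hmerge {a b : PyHeap} (ha : IsHeap a) (hb : IsHeap b) : IsHeap (hmerge a b) := by
  fun_induction hmerge a b with
  | case1 => exact hb
  | case2 => exact ha
  | case3 x l r y l' r' hle ih =>
    obtain ⟨h1, h2, h3, h4⟩ := ha
    refine ⟨?_, h1, ih h4 hb, h3⟩
    intro z hz
    simp [hms] at hz
    rcases hz with hz | hz | hz | hz
    · omega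
    · exact h2 z hz
    · exact le_trans hle (hb.1 z hz)
    · exact le_trans hle (hb.2.1 z hz)
  | case4 x l r y l' r' hle ih =>
    obtain ⟨h1, h2, h3, h4⟩ := hb
    refine ⟨?_, h1, ih h4 ha, h3⟩
    intro z hz
    simp [hms] at hz
    rcases hz with hz | hz | hz | hz
    · omega
    · exact h2 z hz
    · exact le_trans (by omega) (ha.1 z hz)
    · exact le_trans (by omega) (ha.2.1 z hz)

theorem isHeap_hpush {h : PyHeap} (hh : IsHeap h) (x : Int) : IsHeap (hpush h x) :=
  isHeap_hmerge hh (by simp [IsHeap, hms])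

@[simp] theorem hms_hpush (h : PyHeap) (x : Int) : hms (hpush h x) = x ::ₘ hms h := by
  simp [hpush, hms, ← Multiset.singleton_add]; abel

theorem hpush_ne_nil (h : PyHeap) (x : Int) : hpush h x ≠ .nil := by
  cases h <;> (simp [hpush, hmerge]; try (split <;> simp))

theorem hfy_spec (l : List Int) : hms (hfy l) = (l : Multiset Int) ∧ IsHeap (hfy l) := by
  suffices h : ∀ (acc : PyHeap), IsHeap acc →
      hms (l.foldl hpush acc) = hms acc + (l : Multiset Int) ∧ IsHeap (l.foldl hpush acc) by
    simpa [hfy, hms] using h .nil trivial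
  induction l with
  | nil => intro acc ha; simp [ha]
  | cons x t ih =>
    intro acc ha
    obtain ⟨h1, h2⟩ := ih (hpush acc x) (isHeap_hpush ha x)
    refine ⟨?_, h2⟩
    simp [h1, ← Multiset.cons_coe, ← Multiset.singleton_add]
    abel

theorem hms_eq_zero_iff (h : PyHeap) : hms h = 0 ↔ h = .nil := by
  cases h <;> simp [hms]

theorem coe_snoc (a : Int) (L : List Int) :
    (a ::ₘ (L : Multiset Int)) = ((L ++ [a] : List Int) : Multiset Int) := by
  rw [Multiset.cons_coe]
  exact Multiset.coe_eq_coe.mpr (List.perm_append_singleton a L).symm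

theorem hpop_spec {heap h1 : PyHeap} {s : Int} (hp : hpop heap = some (s, h1)) (hh : IsHeap heap) :
    hms heap = s ::ₘ hms h1 ∧ IsHeap h1 ∧ ∀ y ∈ hms heap, s ≤ y := by
  cases heap with
  | nil => simp [hpop] at hp
  | node x l r =>
    simp [hpop] at hp
    obtain ⟨rfl, rfl⟩ := hp
    obtain ⟨b1, b2, il, ir⟩ := hh
    refine ⟨by simp [hms], isHeap_hmerge il ir, ?_⟩
    intro y hy
    simp [hms] at hy
    rcases hy with rfl | hy | hy
    · exact le_refl _
    · exact b1 y hy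
    · exact b2 y hy

-- the popped heap value IS min(current_pool), and the rest matches erase
theorem pop_coe {heap h1 : PyHeap} {cur : List Int} {s : Int}
    (hc : hms heap = (cur : Multiset Int)) (hp : hpop heap = some (s, h1)) (hh : IsHeap heap) :
    PySem.List.min? cur (fun y => y) = some s ∧
      hms h1 = ((cur.erase s : List Int) : Multiset Int) ∧ IsHeap h1 := by
  obtain ⟨he, hih, hmin⟩ := hpop_spec hp hh
  have hsmem : s ∈ cur := by
    have : s ∈ hms heap := by rw [he]; exact Multiset.mem_cons_self _ _
    rwa [hc, Multiset.mem_coe] at this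
  have hne : cur ≠ [] := by rintro rfl; simp at hsmem
  obtain ⟨m, hm⟩ : ∃ m, PySem.List.min? cur (fun y => y) = some m := by
    cases h : PySem.List.min? cur (fun y => y) with
    | none => exact absurd ((PySem.List.min?_eq_none_iff cur _).mp h) hne
    | some m => exact ⟨m, rfl⟩
  have hmmem := PySem.List.min?_mem hm
  have hms' : m = s :=
    le_antisymm (PySem.List.min?_isMin hm s hsmem)
      (hmin m (by rw [hc, Multiset.mem_coe]; exact hmmem))
  refine ⟨hms' ▸ hm, ?_, hih⟩
  have h2 : hms h1 = (hms heap).erase s := by rw [he, Multiset.erase_cons_head]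
  rw [h2, hc, Multiset.coe_erase]

-- one-step unfoldings
theorem loopA_nil (arr : List Int) (fuel : Nat) (i : Int) (run : List Int) (next : PyHeap)
    (runs : List (List Int)) : loopA arr fuel .nil i run next runs = runs := by
  cases fuel with
  | zero => rw [loopA]
  | succ n => rw [loopA]; simp [hpop]

theorem loopB_nil (arr : List Int) (fuel : Nat) (i : Int) (run : List Int) (nxt : List Int)
    (runs : List (List Int)) : loopB arr fuel [] i run nxt runs = runs := by
  cases fuel with
  | zero => rw [loopB]
  | succ n => rw [loopB]; simp [PySem.List.min?]

theorem loopB_some {cur : List Int} {smallest : Int} (arr : List Int) (fuel : Nat) (i : Int)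
    (run nxt : List Int) (runs : List (List Int))
    (hm : PySem.List.min? cur (fun y => y) = some smallest) (hmem : smallest ∈ cur) :
    loopB arr (fuel + 1) cur i run nxt runs =
      (if i < (arr.length : Int) then
        if (PySem.List.pyGetD arr i 0) ≥ smallest then
          if cur.erase smallest ++ [PySem.List.pyGetD arr i 0] = [] then
            loopB arr fuel nxt (i + 1) [] [] (runs ++ [run ++ [smallest]])
          else
            loopB arr fuel (cur.erase smallest ++ [PySem.List.pyGetD arr i 0]) (i + 1) (run ++ [smallest]) nxt runs
        else
          if cur.erase smallest = [] then
            loopB arr fuel (nxt ++ [PySem.List.pyGetD arr i 0]) (i + 1) [] [] (runs ++ [run ++ [smallest]])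
          else
            loopB arr fuel (cur.erase smallest) (i + 1) (run ++ [smallest]) (nxt ++ [PySem.List.pyGetD arr i 0]) runs
      else
        if cur.erase smallest = [] then
          loopB arr fuel nxt i [] [] (runs ++ [run ++ [smallest]])
        else
          loopB arr fuel (cur.erase smallest) i (run ++ [smallest]) nxt runs) := by
  rw [loopB, hm]
  simp only [PySem.List.remove?_eq_some_erase cur smallest hmem, Option.getD_some]

-- the coupling: when each heap holds exactly its pool's multiset, the loops agree (any fuel)
theorem loop_eq (fuel : Nat) :
    ∀ (arr : List Int) (heap : PyHeap) (i : Int) (run : List Int) (next : PyHeap)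
      (runs : List (List Int)) (cur nxt : List Int),
      hms heap = (cur : Multiset Int) → hms next = (nxt : Multiset Int) →
      IsHeap heap → IsHeap next →
      loopA arr fuel heap i run next runs = loopB arr fuel cur i run nxt runs := by
  induction fuel with
  | zero => intros; rw [loopA, loopB]
  | succ fuel ih =>
    intro arr heap i run next runs cur nxt h1 h2 hh hn
    cases heap with
    | nil =>
      have : cur = [] := by
        have := h1.symm
        simpa [hms, Multiset.coe_eq_zero] using this
      subst this
      rw [loopA_nil, loopB_nil]
    | node x l r =>
      have hp : hpop (.node x l r) = some (x, hmerge l r) := rfl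
      obtain ⟨hmin, herase, hih1⟩ := pop_coe h1 hp hh
      have hmem : x ∈ cur := PySem.List.min?_mem hmin
      rw [loopB_some arr fuel i run nxt runs hmin hmem, loopA]
      simp only [hpop]
      have hnilswap : hms (hmerge l r) = 0 ↔ cur.erase x = [] := by
        rw [herase, Multiset.coe_eq_zero]
      by_cases hlt : i < (arr.length : Int)
      · simp only [if_pos hlt]
        by_cases hge : (PySem.List.pyGetD arr i 0) ≥ x
        · simp only [if_pos hge]
          rw [if_neg (hpush_ne_nil _ _), if_neg (by simp)]
          exact ih arr _ (i + 1) _ next runs _ nxt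
            (by rw [hms_hpush, herase]; exact coe_snoc _ _)
            h2 (isHeap_hpush hih1 _) hn
        · simp only [if_neg hge]
          by_cases hz : hmerge l r = .nil
          · rw [if_pos hz, if_pos (by rw [← hnilswap, hms_eq_zero_iff]; exact hz)]
            exact ih arr _ (i + 1) [] .nil _ _ []
              (by rw [hms_hpush, h2]; exact coe_snoc _ _)
              (by simp [hms]) (isHeap_hpush hn _) trivial
          · rw [if_neg hz, if_neg (by rw [← hnilswap, hms_eq_zero_iff]; exact hz)]
            exact ih arr _ (i + 1) _ _ runs _ _
              herase
              (by rw [hms_hpush, h2]; exact coe_snoc _ _)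
              hih1 (isHeap_hpush hn _)
      · simp only [if_neg hlt]
        by_cases hz : hmerge l r = .nil
        · rw [if_pos hz, if_pos (by rw [← hnilswap, hms_eq_zero_iff]; exact hz)]
          exact ih arr next i [] .nil _ nxt []
            h2 (by simp [hms]) hn trivial
        · rw [if_neg hz, if_neg (by rw [← hnilswap, hms_eq_zero_iff]; exact hz)]
          exact ih arr _ i _ next runs _ nxt
            herase h2 hih1 hn

-- ===== VERDICT (by name: the statement is the Claim_ definition above) =====
theorem replacement_selection_spec : Claim_equal_replacement_selection := by
  intro arr m _
  unfold Spec_replacement_selection replacement_selection replacement_selection_alt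
  obtain ⟨h1, h2⟩ := hfy_spec (PySem.List.slice arr none (some m))
  exact loop_eq (2 * arr.length + 1) arr _ m [] .nil [] _ [] h1 (by simp [hms]) h2 trivial
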